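-- pv_equiv track=rewrite | github.com/wbt8866/wbt8866.github.io | assets/mainRes/native/df/dfa415d3-e63d-4c36-8191-4b54320447a0.8b0de.py | uuid2uuid
-- ===== SOURCE A (Python) =====
-- def uuid2uuid(base64):
--     BASE64_KEYS = 'ABCDEFGHIJKLMNOPQRSTUVWXYZabcdefghijklmnopqrstuvwxyz0123456789+/='
--     BASE64_VALUES = [0 for i in range(123)]
--     for i in range(123):
--         BASE64_VALUES[i] = 64
--     for i in range(64):
--         BASE64_VALUES[ord(BASE64_KEYS[i])] = i
--     Base64Values = BASE64_VALUES
--     HexChars = "0123456789abcdef"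
--     _t = ["", "", "", ""]
--     _tt = ["-"]
--     UuidTemplate = _t + _t + _tt + _t + _tt + _t + _tt + _t + _tt + _t + _t + _t
--     Indices = []
--     _index = 0
--     for v in UuidTemplate:
--         if v == "":
--             Indices.append(_index)
--         _index += 1
--     if len(base64) != 22:
--         return base64
--     UuidTemplate[0] = base64[0]
--     UuidTemplate[1] = base64[1]
--     i = 2
--     j = 2
--     while i < 22:
--         lhs = Base64Values[ord(base64[i])]
--         rhs = Base64Values[ord(base64[i + 1])]
--         UuidTemplate[Indices[j]] = HexChars[lhs >> 2]
--         j += 1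
--         UuidTemplate[Indices[j]] = HexChars[((lhs & 3) << 2) | rhs >> 4]
--         j += 1
--         UuidTemplate[Indices[j]] = HexChars[rhs & 0xF]
--         j += 1
--         i += 2
--     return "".join(UuidTemplate)
-- ===== SOURCE B (Python) =====
-- def uuid2uuid(base64):
--     # streaming decoder: one char at a time with a 2-bit carry, then dash-format by slicing
--     if len(base64) != 22:
--         return base64
--     KEYS = 'ABCDEFGHIJKLMNOPQRSTUVWXYZabcdefghijklmnopqrstuvwxyz0123456789+/'
--     val = {c: i for i, c in enumerate(KEYS)}
--     HexChars = "0123456789abcdef"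
--     out = [base64[0], base64[1]]
--     carry = 0
--     for k, c in enumerate(base64[2:]):
--         v = val.get(c, 64)
--         if k % 2 == 0:
--             out.append(HexChars[v >> 2])
--             carry = v & 3
--         else:
--             out.append(HexChars[(carry << 2) | (v >> 4)])
--             out.append(HexChars[v & 15])
--     h = "".join(out)
--     return "-".join((h[:8], h[8:12], h[12:16], h[16:20], h[20:]))
-- ===== Notes on version B (the rewrite author's own statement) =====
-- stated objective: simpler
-- what changed: B replaces A's pair-block decoding into a 36-slot template driven by an Indices map and j pointer with a streaming decoder: one pass over the chars of base64[2:] keeping a 2-bit carry, using a dict built by enumerate instead of the 123-entry table, emitting hex digits into a flat list and dash-formatting by slicing at the end; the len!=22 early return is kept.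
import Mathlib
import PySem

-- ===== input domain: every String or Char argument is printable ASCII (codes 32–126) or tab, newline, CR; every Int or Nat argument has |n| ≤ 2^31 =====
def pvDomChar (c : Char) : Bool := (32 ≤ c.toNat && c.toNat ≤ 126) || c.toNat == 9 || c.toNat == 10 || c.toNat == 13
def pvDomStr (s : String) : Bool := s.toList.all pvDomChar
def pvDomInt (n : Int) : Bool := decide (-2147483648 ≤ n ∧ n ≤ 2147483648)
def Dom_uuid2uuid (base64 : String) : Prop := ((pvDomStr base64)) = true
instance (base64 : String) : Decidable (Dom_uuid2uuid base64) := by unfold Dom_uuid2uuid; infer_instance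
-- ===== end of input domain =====

-- B replaces A's pair-block/template/Indices decoding by a streaming per-char decoder with a 2-bit carry and slice-based dash formatting (objective: simpler).

-- ===== PORT A =====
-- Python strings held in the template are represented as their char lists (PySem.Chars); exact.
-- The function-local constants (keys, values table, template, Indices) are hoisted to named defs;
-- the while loop over i = 2,4,…,20 is ported as a fold over that range carrying the (template, j) state.
def pvKeysA : List Char := "ABCDEFGHIJKLMNOPQRSTUVWXYZabcdefghijklmnopqrstuvwxyz0123456789+/=".toList
def pvHexA : List Char := "0123456789abcdef".toList
def pvValuesA : List Int :=
  let v0 := (PySem.List.pyRange 0 123 1).map (fun _ => (0 : Int))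
  let v1 := (PySem.List.pyRange 0 123 1).foldl (fun vs i => PySem.List.pySetD vs i 64) v0
  (PySem.List.pyRange 0 64 1).foldl
    (fun vs i => PySem.List.pySetD vs ((PySem.List.pyGetD pvKeysA i ' ').toNat : Int) i) v1
def pvTemplateA : List (List Char) :=
  let _t : List (List Char) := [[], [], [], []]
  let _tt : List (List Char) := [['-']]
  _t ++ _t ++ _tt ++ _t ++ _tt ++ _t ++ _tt ++ _t ++ _tt ++ _t ++ _t ++ _t
def pvIndicesA : List Int :=
  (pvTemplateA.foldl
    (fun (st : List Int × Int) v =>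
      (if v = [] then st.1 ++ [st.2] else st.1, st.2 + 1)) ([], 0)).1
def pvBodyA (cs : List Char) : List Char :=
  let template := PySem.List.pySetD pvTemplateA 0 [PySem.List.pyGetD cs 0 ' ']
  let template := PySem.List.pySetD template 1 [PySem.List.pyGetD cs 1 ' ']
  let res := (PySem.List.pyRange 2 22 2).foldl
    (fun (st : List (List Char) × Int) i =>
      let t := st.1
      let j := st.2
      let lhs := PySem.List.pyGetD pvValuesA ((PySem.List.pyGetD cs i ' ').toNat : Int) 0
      let rhs := PySem.List.pyGetD pvValuesA ((PySem.List.pyGetD cs (i + 1) ' ').toNat : Int) 0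
      let t := PySem.List.pySetD t (PySem.List.pyGetD pvIndicesA j 0) [PySem.List.pyGetD pvHexA (lhs >>> 2) '0']
      let j := j + 1
      let t := PySem.List.pySetD t (PySem.List.pyGetD pvIndicesA j 0) [PySem.List.pyGetD pvHexA (PySem.Int.bor ((PySem.Int.band lhs 3) <<< 2) (rhs >>> 4)) '0']
      let j := j + 1
      let t := PySem.List.pySetD t (PySem.List.pyGetD pvIndicesA j 0) [PySem.List.pyGetD pvHexA (PySem.Int.band rhs 15) '0']
      (t, j + 1))
    (template, 2)
  PySem.Chars.join [] res.1

def uuid2uuid (base64 : String) : String :=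
  if PySem.Str.len base64 ≠ 22 then base64
  else String.ofList (pvBodyA base64.toList)

-- ===== PORT B =====
-- Source B: dict {c: i for i, c in enumerate(KEYS)}; one pass over enumerate(base64[2:]) with state
-- (out, carry); "-".join of the five slices of the joined flat hex list.
def pvKeysB : List Char := "ABCDEFGHIJKLMNOPQRSTUVWXYZabcdefghijklmnopqrstuvwxyz0123456789+/".toList
def pvHexB : List Char := "0123456789abcdef".toList
def pvValB : PySem.Dict Char Int :=
  (PySem.List.enumerate pvKeysB 0).foldl (fun d p => d.insert p.2 p.1) PySem.Dict.empty
def pvBodyB (cs : List Char) : List Char :=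
  let st := (PySem.List.enumerate (PySem.Chars.slice cs (some 2) none) 0).foldl
    (fun (st : List Char × Int) p =>
      let v := pvValB.getD p.2 64
      if PySem.Int.mod p.1 2 == 0 then
        (st.1 ++ [PySem.List.pyGetD pvHexB (v >>> 2) '0'], PySem.Int.band v 3)
      else
        (st.1 ++ [PySem.List.pyGetD pvHexB (PySem.Int.bor (st.2 <<< 2) (v >>> 4)) '0']
              ++ [PySem.List.pyGetD pvHexB (PySem.Int.band v 15) '0'], st.2))
    ([PySem.List.pyGetD cs 0 ' ', PySem.List.pyGetD cs 1 ' '], 0)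
  let h := st.1
  PySem.Chars.join ['-']
    [PySem.Chars.slice h none (some 8), PySem.Chars.slice h (some 8) (some 12),
     PySem.Chars.slice h (some 12) (some 16), PySem.Chars.slice h (some 16) (some 20),
     PySem.Chars.slice h (some 20) none]

def uuid2uuid_alt (base64 : String) : String :=
  if PySem.Str.len base64 ≠ 22 then base64
  else String.ofList (pvBodyB base64.toList)

-- ===== PRECONDITION & SPEC =====
-- Pre_ excludes exactly the inputs where A raises IndexError: a length-22 string containing a
-- char of code ≥ 123 at positions 2..21 or a non-base64 char at an even position 2..20.
def Pre_uuid2uuid (base64 : String) : Prop :=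
  base64.toList.length = 22 →
    ∀ k : Nat, k < 10 →
      (base64.toList.getD (2 + 2 * k) 'A')
        ∈ "ABCDEFGHIJKLMNOPQRSTUVWXYZabcdefghijklmnopqrstuvwxyz0123456789+/".toList ∧
      (base64.toList.getD (3 + 2 * k) 'A').toNat < 123
instance (base64 : String) : Decidable (Pre_uuid2uuid base64) := by unfold Pre_uuid2uuid; infer_instance

def pvWitness_uuid2uuid : String := "aAzZ09+/aAzZ09+/aAzZ09"

def Spec_uuid2uuid (base64 : String) (out : String) : Prop := out = uuid2uuid_alt base64
instance (base64 : String) (out : String) : Decidable (Spec_uuid2uuid base64 out) := by unfold Spec_uuid2uuid; infer_instance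

-- ===== CLAIM (what is proved, stated in full; the proofs are below) =====
def Claim_equal_uuid2uuid : Prop := ∀ (base64 : String), Dom_uuid2uuid base64 → Pre_uuid2uuid base64 → Spec_uuid2uuid base64 (uuid2uuid base64)

-- ===== LEMMAS AND PROOFS =====

-- the 64-key alphabet as an explicit char list (= the string literal in Pre_)
def pvKChars : List Char := ['A','B','C','D','E','F','G','H','I','J','K','L','M','N','O','P','Q','R','S','T','U','V','W','X','Y','Z','a','b','c','d','e','f','g','h','i','j','k','l','m','n','o','p','q','r','s','t','u','v','w','x','y','z','0','1','2','3','4','5','6','7','8','9','+','/']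

set_option maxRecDepth 4000 in
theorem pv_kchars_eq : "ABCDEFGHIJKLMNOPQRSTUVWXYZabcdefghijklmnopqrstuvwxyz0123456789+/".toList = pvKChars := rfl

set_option maxRecDepth 4000 in
theorem pv_keys_lt_all : (pvKChars.all (fun x => decide (x.toNat < 123))) = true := by rfl

-- every char of the 64-key alphabet has code < 123
theorem pv_keys_lt (c : Char) (h : c ∈ pvKChars) : c.toNat < 123 := by
  simpa using List.all_eq_true.mp pv_keys_lt_all c h

set_option maxRecDepth 100000 in
theorem pv_val_eq_all : ((List.range 123).all
    (fun n => PySem.Dict.getD pvValB (Char.ofNat n) 64 == PySem.List.pyGetD pvValuesA ((n : Int)) 0)) = true := by rfl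

-- for chars with code < 123, B's dict lookup agrees with A's 123-entry table
theorem pv_val_eq (c : Char) (h : c.toNat < 123) :
    PySem.Dict.getD pvValB c 64 = PySem.List.pyGetD pvValuesA ((c.toNat : Int)) 0 := by
  have := List.all_eq_true.mp pv_val_eq_all c.toNat (List.mem_range.mpr h)
  rw [Char.ofNat_toNat] at this
  exact of_decide_eq_true (by simpa using this)

-- on any 22-char list whose chars at positions 2..21 have code < 123, the two bodies agree
set_option maxRecDepth 100000 in
set_option maxHeartbeats 4000000 in
theorem pvBody_eq (c0 c1 c2 c3 c4 c5 c6 c7 c8 c9 c10 c11 c12 c13 c14 c15 c16 c17 c18 c19 c20 c21 : Char)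
    (h2 : c2.toNat < 123) (h3 : c3.toNat < 123) (h4 : c4.toNat < 123) (h5 : c5.toNat < 123) (h6 : c6.toNat < 123) (h7 : c7.toNat < 123) (h8 : c8.toNat < 123) (h9 : c9.toNat < 123) (h10 : c10.toNat < 123) (h11 : c11.toNat < 123) (h12 : c12.toNat < 123) (h13 : c13.toNat < 123) (h14 : c14.toNat < 123) (h15 : c15.toNat < 123) (h16 : c16.toNat < 123) (h17 : c17.toNat < 123) (h18 : c18.toNat < 123) (h19 : c19.toNat < 123) (h20 : c20.toNat < 123) (h21 : c21.toNat < 123) :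
    pvBodyA [c0,c1,c2,c3,c4,c5,c6,c7,c8,c9,c10,c11,c12,c13,c14,c15,c16,c17,c18,c19,c20,c21] = pvBodyB [c0,c1,c2,c3,c4,c5,c6,c7,c8,c9,c10,c11,c12,c13,c14,c15,c16,c17,c18,c19,c20,c21] := by
  simp only [pvBodyA, pvBodyB,
    show PySem.List.pyRange 2 22 2 = [2,4,6,8,10,12,14,16,18,20] from by decide,
    show pvHexA = pvHexB from by decide,
    show pvTemplateA = [[], [], [], [], [], [], [], [], ['-'], [], [], [], [], ['-'], [], [], [], [], ['-'], [], [], [], [], ['-'], [], [], [], [], [], [], [], [], [], [], [], []] from by decide,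
    show pvIndicesA = ([0,1,2,3,4,5,6,7,9,10,11,12,14,15,16,17,19,20,21,22,24,25,26,27,28,29,30,31,32,33,34,35] : List Int) from by decide,
    show PySem.List.pyGetD ([0,1,2,3,4,5,6,7,9,10,11,12,14,15,16,17,19,20,21,22,24,25,26,27,28,29,30,31,32,33,34,35] : List Int) (2 : Int) 0 = 2 from by decide,
    show PySem.List.pyGetD ([0,1,2,3,4,5,6,7,9,10,11,12,14,15,16,17,19,20,21,22,24,25,26,27,28,29,30,31,32,33,34,35] : List Int) (3 : Int) 0 = 3 from by decide,
    show PySem.List.pyGetD ([0,1,2,3,4,5,6,7,9,10,11,12,14,15,16,17,19,20,21,22,24,25,26,27,28,29,30,31,32,33,34,35] : List Int) (4 : Int) 0 = 4 from by decide,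
    show PySem.List.pyGetD ([0,1,2,3,4,5,6,7,9,10,11,12,14,15,16,17,19,20,21,22,24,25,26,27,28,29,30,31,32,33,34,35] : List Int) (5 : Int) 0 = 5 from by decide,
    show PySem.List.pyGetD ([0,1,2,3,4,5,6,7,9,10,11,12,14,15,16,17,19,20,21,22,24,25,26,27,28,29,30,31,32,33,34,35] : List Int) (6 : Int) 0 = 6 from by decide,
    show PySem.List.pyGetD ([0,1,2,3,4,5,6,7,9,10,11,12,14,15,16,17,19,20,21,22,24,25,26,27,28,29,30,31,32,33,34,35] : List Int) (7 : Int) 0 = 7 from by decide,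
    show PySem.List.pyGetD ([0,1,2,3,4,5,6,7,9,10,11,12,14,15,16,17,19,20,21,22,24,25,26,27,28,29,30,31,32,33,34,35] : List Int) (8 : Int) 0 = 9 from by decide,
    show PySem.List.pyGetD ([0,1,2,3,4,5,6,7,9,10,11,12,14,15,16,17,19,20,21,22,24,25,26,27,28,29,30,31,32,33,34,35] : List Int) (9 : Int) 0 = 10 from by decide,
    show PySem.List.pyGetD ([0,1,2,3,4,5,6,7,9,10,11,12,14,15,16,17,19,20,21,22,24,25,26,27,28,29,30,31,32,33,34,35] : List Int) (10 : Int) 0 = 11 from by decide,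
    show PySem.List.pyGetD ([0,1,2,3,4,5,6,7,9,10,11,12,14,15,16,17,19,20,21,22,24,25,26,27,28,29,30,31,32,33,34,35] : List Int) (11 : Int) 0 = 12 from by decide,
    show PySem.List.pyGetD ([0,1,2,3,4,5,6,7,9,10,11,12,14,15,16,17,19,20,21,22,24,25,26,27,28,29,30,31,32,33,34,35] : List Int) (12 : Int) 0 = 14 from by decide,
    show PySem.List.pyGetD ([0,1,2,3,4,5,6,7,9,10,11,12,14,15,16,17,19,20,21,22,24,25,26,27,28,29,30,31,32,33,34,35] : List Int) (13 : Int) 0 = 15 from by decide,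
    show PySem.List.pyGetD ([0,1,2,3,4,5,6,7,9,10,11,12,14,15,16,17,19,20,21,22,24,25,26,27,28,29,30,31,32,33,34,35] : List Int) (14 : Int) 0 = 16 from by decide,
    show PySem.List.pyGetD ([0,1,2,3,4,5,6,7,9,10,11,12,14,15,16,17,19,20,21,22,24,25,26,27,28,29,30,31,32,33,34,35] : List Int) (15 : Int) 0 = 17 from by decide,
    show PySem.List.pyGetD ([0,1,2,3,4,5,6,7,9,10,11,12,14,15,16,17,19,20,21,22,24,25,26,27,28,29,30,31,32,33,34,35] : List Int) (16 : Int) 0 = 19 from by decide,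
    show PySem.List.pyGetD ([0,1,2,3,4,5,6,7,9,10,11,12,14,15,16,17,19,20,21,22,24,25,26,27,28,29,30,31,32,33,34,35] : List Int) (17 : Int) 0 = 20 from by decide,
    show PySem.List.pyGetD ([0,1,2,3,4,5,6,7,9,10,11,12,14,15,16,17,19,20,21,22,24,25,26,27,28,29,30,31,32,33,34,35] : List Int) (18 : Int) 0 = 21 from by decide,
    show PySem.List.pyGetD ([0,1,2,3,4,5,6,7,9,10,11,12,14,15,16,17,19,20,21,22,24,25,26,27,28,29,30,31,32,33,34,35] : List Int) (19 : Int) 0 = 22 from by decide,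
    show PySem.List.pyGetD ([0,1,2,3,4,5,6,7,9,10,11,12,14,15,16,17,19,20,21,22,24,25,26,27,28,29,30,31,32,33,34,35] : List Int) (20 : Int) 0 = 24 from by decide,
    show PySem.List.pyGetD ([0,1,2,3,4,5,6,7,9,10,11,12,14,15,16,17,19,20,21,22,24,25,26,27,28,29,30,31,32,33,34,35] : List Int) (21 : Int) 0 = 25 from by decide,
    show PySem.List.pyGetD ([0,1,2,3,4,5,6,7,9,10,11,12,14,15,16,17,19,20,21,22,24,25,26,27,28,29,30,31,32,33,34,35] : List Int) (22 : Int) 0 = 26 from by decide,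
    show PySem.List.pyGetD ([0,1,2,3,4,5,6,7,9,10,11,12,14,15,16,17,19,20,21,22,24,25,26,27,28,29,30,31,32,33,34,35] : List Int) (23 : Int) 0 = 27 from by decide,
    show PySem.List.pyGetD ([0,1,2,3,4,5,6,7,9,10,11,12,14,15,16,17,19,20,21,22,24,25,26,27,28,29,30,31,32,33,34,35] : List Int) (24 : Int) 0 = 28 from by decide,
    show PySem.List.pyGetD ([0,1,2,3,4,5,6,7,9,10,11,12,14,15,16,17,19,20,21,22,24,25,26,27,28,29,30,31,32,33,34,35] : List Int) (25 : Int) 0 = 29 from by decide,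
    show PySem.List.pyGetD ([0,1,2,3,4,5,6,7,9,10,11,12,14,15,16,17,19,20,21,22,24,25,26,27,28,29,30,31,32,33,34,35] : List Int) (26 : Int) 0 = 30 from by decide,
    show PySem.List.pyGetD ([0,1,2,3,4,5,6,7,9,10,11,12,14,15,16,17,19,20,21,22,24,25,26,27,28,29,30,31,32,33,34,35] : List Int) (27 : Int) 0 = 31 from by decide,
    show PySem.List.pyGetD ([0,1,2,3,4,5,6,7,9,10,11,12,14,15,16,17,19,20,21,22,24,25,26,27,28,29,30,31,32,33,34,35] : List Int) (28 : Int) 0 = 32 from by decide,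
    show PySem.List.pyGetD ([0,1,2,3,4,5,6,7,9,10,11,12,14,15,16,17,19,20,21,22,24,25,26,27,28,29,30,31,32,33,34,35] : List Int) (29 : Int) 0 = 33 from by decide,
    show PySem.List.pyGetD ([0,1,2,3,4,5,6,7,9,10,11,12,14,15,16,17,19,20,21,22,24,25,26,27,28,29,30,31,32,33,34,35] : List Int) (30 : Int) 0 = 34 from by decide,
    show PySem.List.pyGetD ([0,1,2,3,4,5,6,7,9,10,11,12,14,15,16,17,19,20,21,22,24,25,26,27,28,29,30,31,32,33,34,35] : List Int) (31 : Int) 0 = 35 from by decide,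
    show PySem.Chars.slice [c0,c1,c2,c3,c4,c5,c6,c7,c8,c9,c10,c11,c12,c13,c14,c15,c16,c17,c18,c19,c20,c21] (some 2) none
       = [c2,c3,c4,c5,c6,c7,c8,c9,c10,c11,c12,c13,c14,c15,c16,c17,c18,c19,c20,c21] from by
         simp [PySem.Chars.slice, PySem.List.slice_some_none],
    PySem.List.enumerate_cons, PySem.List.enumerate_nil,
    show (PySem.Int.mod (0:Int) 2 == 0) = true from by decide,
    show (PySem.Int.mod (1:Int) 2 == 0) = false from by decide,
    show (PySem.Int.mod (2:Int) 2 == 0) = true from by decide,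
    show (PySem.Int.mod (3:Int) 2 == 0) = false from by decide,
    show (PySem.Int.mod (4:Int) 2 == 0) = true from by decide,
    show (PySem.Int.mod (5:Int) 2 == 0) = false from by decide,
    show (PySem.Int.mod (6:Int) 2 == 0) = true from by decide,
    show (PySem.Int.mod (7:Int) 2 == 0) = false from by decide,
    show (PySem.Int.mod (8:Int) 2 == 0) = true from by decide,
    show (PySem.Int.mod (9:Int) 2 == 0) = false from by decide,
    show (PySem.Int.mod (10:Int) 2 == 0) = true from by decide,
    show (PySem.Int.mod (11:Int) 2 == 0) = false from by decide,
    show (PySem.Int.mod (12:Int) 2 == 0) = true from by decide,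
    show (PySem.Int.mod (13:Int) 2 == 0) = false from by decide,
    show (PySem.Int.mod (14:Int) 2 == 0) = true from by decide,
    show (PySem.Int.mod (15:Int) 2 == 0) = false from by decide,
    show (PySem.Int.mod (16:Int) 2 == 0) = true from by decide,
    show (PySem.Int.mod (17:Int) 2 == 0) = false from by decide,
    show (PySem.Int.mod (18:Int) 2 == 0) = true from by decide,
    show (PySem.Int.mod (19:Int) 2 == 0) = false from by decide,
    show PySem.List.pyGetD [c0,c1,c2,c3,c4,c5,c6,c7,c8,c9,c10,c11,c12,c13,c14,c15,c16,c17,c18,c19,c20,c21] (0 : Int) ' ' = c0 from by simp [pysem],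
    show PySem.List.pyGetD [c0,c1,c2,c3,c4,c5,c6,c7,c8,c9,c10,c11,c12,c13,c14,c15,c16,c17,c18,c19,c20,c21] (1 : Int) ' ' = c1 from by simp [pysem],
    show PySem.List.pyGetD [c0,c1,c2,c3,c4,c5,c6,c7,c8,c9,c10,c11,c12,c13,c14,c15,c16,c17,c18,c19,c20,c21] (2 : Int) ' ' = c2 from by simp [pysem],
    show PySem.List.pyGetD [c0,c1,c2,c3,c4,c5,c6,c7,c8,c9,c10,c11,c12,c13,c14,c15,c16,c17,c18,c19,c20,c21] (3 : Int) ' ' = c3 from by simp [pysem],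
    show PySem.List.pyGetD [c0,c1,c2,c3,c4,c5,c6,c7,c8,c9,c10,c11,c12,c13,c14,c15,c16,c17,c18,c19,c20,c21] (4 : Int) ' ' = c4 from by simp [pysem],
    show PySem.List.pyGetD [c0,c1,c2,c3,c4,c5,c6,c7,c8,c9,c10,c11,c12,c13,c14,c15,c16,c17,c18,c19,c20,c21] (5 : Int) ' ' = c5 from by simp [pysem],
    show PySem.List.pyGetD [c0,c1,c2,c3,c4,c5,c6,c7,c8,c9,c10,c11,c12,c13,c14,c15,c16,c17,c18,c19,c20,c21] (6 : Int) ' ' = c6 from by simp [pysem],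
    show PySem.List.pyGetD [c0,c1,c2,c3,c4,c5,c6,c7,c8,c9,c10,c11,c12,c13,c14,c15,c16,c17,c18,c19,c20,c21] (7 : Int) ' ' = c7 from by simp [pysem],
    show PySem.List.pyGetD [c0,c1,c2,c3,c4,c5,c6,c7,c8,c9,c10,c11,c12,c13,c14,c15,c16,c17,c18,c19,c20,c21] (8 : Int) ' ' = c8 from by simp [pysem],
    show PySem.List.pyGetD [c0,c1,c2,c3,c4,c5,c6,c7,c8,c9,c10,c11,c12,c13,c14,c15,c16,c17,c18,c19,c20,c21] (9 : Int) ' ' = c9 from by simp [pysem],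
    show PySem.List.pyGetD [c0,c1,c2,c3,c4,c5,c6,c7,c8,c9,c10,c11,c12,c13,c14,c15,c16,c17,c18,c19,c20,c21] (10 : Int) ' ' = c10 from by simp [pysem],
    show PySem.List.pyGetD [c0,c1,c2,c3,c4,c5,c6,c7,c8,c9,c10,c11,c12,c13,c14,c15,c16,c17,c18,c19,c20,c21] (11 : Int) ' ' = c11 from by simp [pysem],
    show PySem.List.pyGetD [c0,c1,c2,c3,c4,c5,c6,c7,c8,c9,c10,c11,c12,c13,c14,c15,c16,c17,c18,c19,c20,c21] (12 : Int) ' ' = c12 from by simp [pysem],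
    show PySem.List.pyGetD [c0,c1,c2,c3,c4,c5,c6,c7,c8,c9,c10,c11,c12,c13,c14,c15,c16,c17,c18,c19,c20,c21] (13 : Int) ' ' = c13 from by simp [pysem],
    show PySem.List.pyGetD [c0,c1,c2,c3,c4,c5,c6,c7,c8,c9,c10,c11,c12,c13,c14,c15,c16,c17,c18,c19,c20,c21] (14 : Int) ' ' = c14 from by simp [pysem],
    show PySem.List.pyGetD [c0,c1,c2,c3,c4,c5,c6,c7,c8,c9,c10,c11,c12,c13,c14,c15,c16,c17,c18,c19,c20,c21] (15 : Int) ' ' = c15 from by simp [pysem],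
    show PySem.List.pyGetD [c0,c1,c2,c3,c4,c5,c6,c7,c8,c9,c10,c11,c12,c13,c14,c15,c16,c17,c18,c19,c20,c21] (16 : Int) ' ' = c16 from by simp [pysem],
    show PySem.List.pyGetD [c0,c1,c2,c3,c4,c5,c6,c7,c8,c9,c10,c11,c12,c13,c14,c15,c16,c17,c18,c19,c20,c21] (17 : Int) ' ' = c17 from by simp [pysem],
    show PySem.List.pyGetD [c0,c1,c2,c3,c4,c5,c6,c7,c8,c9,c10,c11,c12,c13,c14,c15,c16,c17,c18,c19,c20,c21] (18 : Int) ' ' = c18 from by simp [pysem],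
    show PySem.List.pyGetD [c0,c1,c2,c3,c4,c5,c6,c7,c8,c9,c10,c11,c12,c13,c14,c15,c16,c17,c18,c19,c20,c21] (19 : Int) ' ' = c19 from by simp [pysem],
    show PySem.List.pyGetD [c0,c1,c2,c3,c4,c5,c6,c7,c8,c9,c10,c11,c12,c13,c14,c15,c16,c17,c18,c19,c20,c21] (20 : Int) ' ' = c20 from by simp [pysem],
    show PySem.List.pyGetD [c0,c1,c2,c3,c4,c5,c6,c7,c8,c9,c10,c11,c12,c13,c14,c15,c16,c17,c18,c19,c20,c21] (21 : Int) ' ' = c21 from by simp [pysem],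
    List.foldl_cons, List.foldl_nil, Int.reduceAdd,
    if_true, if_false, Bool.false_eq_true]
  rw [pv_val_eq c2 h2, pv_val_eq c3 h3, pv_val_eq c4 h4, pv_val_eq c5 h5, pv_val_eq c6 h6, pv_val_eq c7 h7, pv_val_eq c8 h8, pv_val_eq c9 h9, pv_val_eq c10 h10, pv_val_eq c11 h11, pv_val_eq c12 h12, pv_val_eq c13 h13, pv_val_eq c14 h14, pv_val_eq c15 h15, pv_val_eq c16 h16, pv_val_eq c17 h17, pv_val_eq c18 h18, pv_val_eq c19 h19, pv_val_eq c20 h20, pv_val_eq c21 h21]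
  simp [PySem.List.pySetD_of_nonneg, List.intersperse, PySem.Chars.join, List.intercalate,
    PySem.Chars.slice, PySem.List.slice, PySem.List.clampIdx, List.flatten]

-- list-level form of the claim
theorem pvMain (l : List Char) (hl : l.length = 22)
    (hp : ∀ k : Nat, k < 10 →
      l.getD (2 + 2 * k) 'A' ∈ "ABCDEFGHIJKLMNOPQRSTUVWXYZabcdefghijklmnopqrstuvwxyz0123456789+/".toList ∧
      (l.getD (3 + 2 * k) 'A').toNat < 123) :
    pvBodyA l = pvBodyB l := by
  rcases l with _ | ⟨c0, l⟩; · simp at hl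
  rcases l with _ | ⟨c1, l⟩; · simp at hl
  rcases l with _ | ⟨c2, l⟩; · simp at hl
  rcases l with _ | ⟨c3, l⟩; · simp at hl
  rcases l with _ | ⟨c4, l⟩; · simp at hl
  rcases l with _ | ⟨c5, l⟩; · simp at hl
  rcases l with _ | ⟨c6, l⟩; · simp at hl
  rcases l with _ | ⟨c7, l⟩; · simp at hl
  rcases l with _ | ⟨c8, l⟩; · simp at hl
  rcases l with _ | ⟨c9, l⟩; · simp at hl
  rcases l with _ | ⟨c10, l⟩; · simp at hl
  rcases l with _ | ⟨c11, l⟩; · simp at hl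
  rcases l with _ | ⟨c12, l⟩; · simp at hl
  rcases l with _ | ⟨c13, l⟩; · simp at hl
  rcases l with _ | ⟨c14, l⟩; · simp at hl
  rcases l with _ | ⟨c15, l⟩; · simp at hl
  rcases l with _ | ⟨c16, l⟩; · simp at hl
  rcases l with _ | ⟨c17, l⟩; · simp at hl
  rcases l with _ | ⟨c18, l⟩; · simp at hl
  rcases l with _ | ⟨c19, l⟩; · simp at hl
  rcases l with _ | ⟨c20, l⟩; · simp at hl
  rcases l with _ | ⟨c21, l⟩; · simp at hl
  rcases l with _ | ⟨z, l⟩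
  case cons => simp at hl
  have e0 := hp 0 (by norm_num)
  rw [pv_kchars_eq] at e0
  simp only [List.getD] at e0
  have e1 := hp 1 (by norm_num)
  rw [pv_kchars_eq] at e1
  simp only [List.getD] at e1
  have e2 := hp 2 (by norm_num)
  rw [pv_kchars_eq] at e2
  simp only [List.getD] at e2
  have e3 := hp 3 (by norm_num)
  rw [pv_kchars_eq] at e3
  simp only [List.getD] at e3
  have e4 := hp 4 (by norm_num)
  rw [pv_kchars_eq] at e4
  simp only [List.getD] at e4
  have e5 := hp 5 (by norm_num)
  rw [pv_kchars_eq] at e5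
  simp only [List.getD] at e5
  have e6 := hp 6 (by norm_num)
  rw [pv_kchars_eq] at e6
  simp only [List.getD] at e6
  have e7 := hp 7 (by norm_num)
  rw [pv_kchars_eq] at e7
  simp only [List.getD] at e7
  have e8 := hp 8 (by norm_num)
  rw [pv_kchars_eq] at e8
  simp only [List.getD] at e8
  have e9 := hp 9 (by norm_num)
  rw [pv_kchars_eq] at e9
  simp only [List.getD] at e9
  exact pvBody_eq c0 c1 c2 c3 c4 c5 c6 c7 c8 c9 c10 c11 c12 c13 c14 c15 c16 c17 c18 c19 c20 c21 (pv_keys_lt _ e0.1) e0.2 (pv_keys_lt _ e1.1) e1.2 (pv_keys_lt _ e2.1) e2.2 (pv_keys_lt _ e3.1) e3.2 (pv_keys_lt _ e4.1) e4.2 (pv_keys_lt _ e5.1) e5.2 (pv_keys_lt _ e6.1) e6.2 (pv_keys_lt _ e7.1) e7.2 (pv_keys_lt _ e8.1) e8.2 (pv_keys_lt _ e9.1) e9.2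

-- ===== VERDICT (by name: the statement is the Claim_ definition above) =====
theorem uuid2uuid_spec : Claim_equal_uuid2uuid := by
  intro s _ hpre
  unfold Spec_uuid2uuid uuid2uuid uuid2uuid_alt
  by_cases h : s.toList.length = 22
  · rw [if_neg (by simp [PySem.Str.len_eq, h]), if_neg (by simp [PySem.Str.len_eq, h])]
    exact congrArg String.ofList (pvMain s.toList h (hpre h))
  · rw [if_pos (by simp [PySem.Str.len_eq]; exact_mod_cast h),
        if_pos (by simp [PySem.Str.len_eq]; exact_mod_cast h)]
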